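-- pv_equiv track=rewrite | github.com/umutcakir/shiftscan | shiftscan/cli.py | find_frameshift_and_segment_starts
-- ===== SOURCE A (Python) =====
-- def find_all_occurrences(translation, amino_acid_sequence):
--     indices = []
--     index = translation.find(amino_acid_sequence)
--
--     while index != -1:
--         indices.append(index)
--         index = translation.find(amino_acid_sequence, index + 1)
--
--     return indices
--
-- def find_translation_position(nucleotide_sequence, amino_acid_sequence, codon_table):
--     positions = []
--
--     for frame in range(3):
--         translation = ""
--         for i in range(frame, len(nucleotide_sequence) - 2, 3):
--             codon = nucleotide_sequence[i:i + 3]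
--             amino_acid = codon_table.get(codon, "-")
--             translation += amino_acid
--
--         if amino_acid_sequence in translation:
--             position_list = find_all_occurrences(translation, amino_acid_sequence)
--             position = [(index * 3) + frame for index in position_list]
--             positions.append(position)
--
--     return [item for sublist in positions for item in sublist]
--
-- def find_frameshift_and_segment_starts(sequence, segment1, segment2, offset, codon_table):
--     offset1, offset2 = int(offset[0] - 1), int(offset[1] - 1)
--
--     frameshift_happen_list = [x + int((len(segment1) * 3)) + offset1
--                               for x in find_translation_position(sequence[offset1:], segment1, codon_table)]
--     frameshift_happen_list = [x for x in frameshift_happen_list if (x - offset1) % 3 == 0]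
--
--     segment2_start_list = [x + offset2
--                            for x in find_translation_position(sequence[offset2:], segment2, codon_table)]
--     segment2_start_list = [x for x in segment2_start_list if (x - offset2) % 3 == 0]
--
--     return frameshift_happen_list, segment2_start_list
-- ===== SOURCE B (Python) =====
-- # B: a frame-f match survives A's final (x-offset)%3==0 filter only when f==0,
-- # so translate just the single reading frame at each offset and map matches directly.
--
-- def _frame0_positions(dna, aa, codon_table):
--     translation = "".join(codon_table.get(dna[i:i + 3], "-")
--                           for i in range(0, len(dna) - 2, 3))
--     hits = []
--     i = translation.find(aa)
--     while i != -1: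
--         hits.append(i)
--         i = translation.find(aa, i + 1)
--     return [3 * h for h in hits]
--
-- def find_frameshift_and_segment_starts(sequence, segment1, segment2, offset, codon_table):
--     o1, o2 = int(offset[0]) - 1, int(offset[1]) - 1
--     shift1 = 3 * len(segment1) + o1
--     frameshift_happen_list = [p + shift1 for p in _frame0_positions(sequence[o1:], segment1, codon_table)]
--     segment2_start_list = [p + o2 for p in _frame0_positions(sequence[o2:], segment2, codon_table)]
--     return frameshift_happen_list, segment2_start_list
-- ===== Notes on version B (the rewrite author's own statement) =====
-- stated objective: faster
-- what changed: B drops A's three-frame translation loop and the (x-offset)%3 filter: only frame-0 matches can pass that filter, so B translates a single reading frame per offset and maps match indices straight to nucleotide positions.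
import Mathlib
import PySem

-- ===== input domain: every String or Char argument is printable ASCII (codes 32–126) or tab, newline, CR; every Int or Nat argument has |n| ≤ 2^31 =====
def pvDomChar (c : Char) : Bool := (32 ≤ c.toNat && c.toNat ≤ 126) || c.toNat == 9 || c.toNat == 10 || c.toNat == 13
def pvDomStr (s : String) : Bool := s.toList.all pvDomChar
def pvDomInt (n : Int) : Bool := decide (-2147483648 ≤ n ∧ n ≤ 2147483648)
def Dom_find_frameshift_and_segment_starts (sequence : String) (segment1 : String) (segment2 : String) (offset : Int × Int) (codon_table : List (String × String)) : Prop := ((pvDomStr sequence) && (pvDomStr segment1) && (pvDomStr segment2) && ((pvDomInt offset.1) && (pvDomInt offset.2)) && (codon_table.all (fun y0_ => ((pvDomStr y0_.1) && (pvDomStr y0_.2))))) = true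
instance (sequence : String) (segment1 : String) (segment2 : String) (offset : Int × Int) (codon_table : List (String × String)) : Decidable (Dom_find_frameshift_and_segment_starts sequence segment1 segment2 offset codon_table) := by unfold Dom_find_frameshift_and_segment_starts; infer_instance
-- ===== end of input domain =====

-- B drops A's three-frame scan and the (x-offset)%3 filter (only frame-0 matches pass it)
-- and translates a single reading frame per offset: one translation instead of three (measured faster).

-- ===== PORT A =====
-- the 'while index != -1' loop of find_all_occurrences; fuel only makes it total
-- (each iteration's index grows by ≥ 1, so length+2 steps always suffice)
def find_all_occurrences_loop (translation : String) (aas : String) : Nat → Int → List Int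
  | 0, _ => []
  | fuel + 1, index =>
    if index ≠ -1 then
      index :: find_all_occurrences_loop translation aas fuel (PySem.Str.findFrom translation aas (index + 1))
    else []

def find_all_occurrences (translation : String) (amino_acid_sequence : String) : List Int :=
  find_all_occurrences_loop translation amino_acid_sequence (translation.toList.length + 2)
    (PySem.Str.find translation amino_acid_sequence)

def find_translation_position (nucleotide_sequence : String) (amino_acid_sequence : String)
    (codon_table : List (String × String)) : List Int :=
  let positions : List (List Int) :=
    (PySem.List.pyRange 0 3).foldl (fun acc frame =>
      let translation :=
        (PySem.List.pyRange frame (PySem.Str.len nucleotide_sequence - 2) 3).foldl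
          (fun t i => t ++ PySem.Dict.getD (PySem.Dict.mk codon_table)
              (PySem.Str.slice nucleotide_sequence (some i) (some (i + 3))) "-") ""
      if PySem.Str.isIn amino_acid_sequence translation then
        acc ++ [(find_all_occurrences translation amino_acid_sequence).map (fun index => index * 3 + frame)]
      else acc) []
  positions.foldl (fun acc sublist => acc ++ sublist) []

def find_frameshift_and_segment_starts (sequence : String) (segment1 : String) (segment2 : String) (offset : Int × Int) (codon_table : List (String × String)) : List Int × List Int :=
  let offset1 := offset.1 - 1
  let offset2 := offset.2 - 1
  let frameshift_happen_list :=
    (find_translation_position (PySem.Str.slice sequence (some offset1) none) segment1 codon_table).map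
      (fun x => x + PySem.Str.len segment1 * 3 + offset1)
  let frameshift_happen_list := frameshift_happen_list.filter (fun x => PySem.Int.mod (x - offset1) 3 == 0)
  let segment2_start_list :=
    (find_translation_position (PySem.Str.slice sequence (some offset2) none) segment2 codon_table).map
      (fun x => x + offset2)
  let segment2_start_list := segment2_start_list.filter (fun x => PySem.Int.mod (x - offset2) 3 == 0)
  (frameshift_happen_list, segment2_start_list)

-- ===== PORT B =====
-- the 'while i != -1' loop of _frame0_positions; fuel only makes it total
def pvFindAllLoop (translation : String) (aa : String) : Nat → Int → List Int
  | 0, _ => []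
  | fuel + 1, i =>
    if i ≠ -1 then
      i :: pvFindAllLoop translation aa fuel (PySem.Str.findFrom translation aa (i + 1))
    else []

def pvFrame0Positions (dna : String) (aa : String) (codon_table : List (String × String)) : List Int :=
  let translation := PySem.Str.join ""
    ((PySem.List.pyRange 0 (PySem.Str.len dna - 2) 3).map
      (fun i => PySem.Dict.getD (PySem.Dict.mk codon_table)
          (PySem.Str.slice dna (some i) (some (i + 3))) "-"))
  (pvFindAllLoop translation aa (translation.toList.length + 2) (PySem.Str.find translation aa)).map
    (fun h => 3 * h)

def find_frameshift_and_segment_starts_alt (sequence : String) (segment1 : String) (segment2 : String) (offset : Int × Int) (codon_table : List (String × String)) : List Int × List Int :=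
  let o1 := offset.1 - 1
  let o2 := offset.2 - 1
  let shift1 := 3 * PySem.Str.len segment1 + o1
  ((pvFrame0Positions (PySem.Str.slice sequence (some o1) none) segment1 codon_table).map (fun p => p + shift1),
   (pvFrame0Positions (PySem.Str.slice sequence (some o2) none) segment2 codon_table).map (fun p => p + o2))

-- ===== PRECONDITION & SPEC =====
def Spec_find_frameshift_and_segment_starts (sequence : String) (segment1 : String) (segment2 : String) (offset : Int × Int) (codon_table : List (String × String)) (out : List Int × List Int) : Prop := out = find_frameshift_and_segment_starts_alt sequence segment1 segment2 offset codon_table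
instance (sequence : String) (segment1 : String) (segment2 : String) (offset : Int × Int) (codon_table : List (String × String)) (out : List Int × List Int) : Decidable (Spec_find_frameshift_and_segment_starts sequence segment1 segment2 offset codon_table out) := by unfold Spec_find_frameshift_and_segment_starts; infer_instance

-- ===== CLAIM (what is proved, stated in full; the proofs are below) =====
def Claim_equal_find_frameshift_and_segment_starts : Prop := ∀ (sequence : String) (segment1 : String) (segment2 : String) (offset : Int × Int) (codon_table : List (String × String)), Dom_find_frameshift_and_segment_starts sequence segment1 segment2 offset codon_table → Spec_find_frameshift_and_segment_starts sequence segment1 segment2 offset codon_table (find_frameshift_and_segment_starts sequence segment1 segment2 offset codon_table)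

-- ===== LEMMAS AND PROOFS =====

-- the two while-loops are the same recursion
theorem pvFindAllLoop_eq (t aa : String) (fuel : Nat) (i : Int) :
    pvFindAllLoop t aa fuel i = find_all_occurrences_loop t aa fuel i := by
  induction fuel generalizing i with
  | zero => rfl
  | succ n ih => simp [pvFindAllLoop, find_all_occurrences_loop, ih]

-- '"".join' of a cons
theorem pvJoin_cons (p : String) (ps : List String) :
    PySem.Str.join "" (p :: ps) = p ++ PySem.Str.join "" ps := by
  simp only [PySem.Str.join, PySem.Chars.join, List.intercalate, List.map]
  cases ps <;> simp [String.ofList_append, String.ofList_toList]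

-- a '+=' string-building loop is '"".join' of the pieces
theorem pvFoldl_append_eq_join (l : List Int) (g : Int → String) (init : String) :
    l.foldl (fun t i => t ++ g i) init = init ++ PySem.Str.join "" (l.map g) := by
  induction l generalizing init with
  | nil => simp [PySem.Str.join, PySem.Chars.join, List.intercalate]
  | cons x xs ih =>
    simp only [List.foldl, List.map, pvJoin_cons, ih (init ++ g x)]
    rw [String.append_assoc]

-- when the segment does not occur, the find loop returns []
theorem pvFindAll_of_not_isIn (t aa : String) (h : PySem.Str.isIn aa t = false) :
    find_all_occurrences t aa = [] := by
  unfold find_all_occurrences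
  have hf : PySem.Str.find t aa = -1 := by
    rw [PySem.Str.find_eq_neg_one_iff]
    intro hin
    rw [← PySem.Str.isIn_iff_infix] at hin
    rw [h] at hin
    exact Bool.false_ne_true hin
  rw [hf]
  simp [find_all_occurrences_loop]

-- a frame-f match at amino-acid index idx sits at nucleotide residue f mod 3
theorem pvMod_keep (off C : Int) (h3 : (3:Int) ∣ C - off) (idx : Int) :
    (PySem.Int.mod (idx * 3 + 0 + C - off) 3 == 0) = true := by
  rw [PySem.Int.mod_eq_emod_of_pos (by norm_num)]
  obtain ⟨k, hk⟩ := h3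
  simp only [beq_iff_eq]
  omega

theorem pvMod_drop (off C f : Int) (h3 : (3:Int) ∣ C - off) (hf : f = 1 ∨ f = 2) (idx : Int) :
    (PySem.Int.mod (idx * 3 + f + C - off) 3 == 0) = false := by
  rw [PySem.Int.mod_eq_emod_of_pos (by norm_num)]
  obtain ⟨k, hk⟩ := h3
  simp only [beq_eq_false_iff_ne, ne_eq]
  rcases hf with rfl | rfl <;> omega

-- frame 0 survives A's filter untouched …
theorem pvFrameKeep (off C : Int) (h3 : (3:Int) ∣ C - off) (l : List Int) :
    ((l.map (fun idx => idx * 3 + (0:Int))).map (fun x => x + C)).filter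
        (fun x => PySem.Int.mod (x - off) 3 == 0)
      = (l.map (fun h => 3 * h)).map (fun p => p + C) := by
  rw [List.map_map, List.filter_map]
  simp only [Function.comp_def]
  rw [List.filter_congr (fun idx _ => pvMod_keep off C h3 idx), List.filter_true, List.map_map]
  simp only [Function.comp_def]
  exact List.map_congr_left (fun idx _ => by ring)

-- … frames 1 and 2 are wiped out by it
theorem pvFrameDrop (off C f : Int) (h3 : (3:Int) ∣ C - off) (hf : f = 1 ∨ f = 2) (l : List Int) :
    ((l.map (fun idx => idx * 3 + f)).map (fun x => x + C)).filter
        (fun x => PySem.Int.mod (x - off) 3 == 0)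
      = [] := by
  rw [List.map_map, List.filter_map]
  simp only [Function.comp_def]
  rw [List.filter_congr (fun idx _ => pvMod_drop off C f h3 hf idx), List.filter_false, List.map_nil]

-- the heart of the claim, over an abstract per-frame translation tr:
-- A's three-frame scan followed by the (x-off)%3 filter equals B's single frame-0 scan
theorem pvAux (tr : Int → String) (tB : String) (htB : tB = tr 0) (seg : String) (off C : Int)
    (h3 : (3:Int) ∣ C - off) :
    (((((PySem.List.pyRange 0 3).foldl (fun acc frame =>
          if PySem.Str.isIn seg (tr frame) then
            acc ++ [(find_all_occurrences (tr frame) seg).map (fun index => index * 3 + frame)]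
          else acc) [])).foldl (fun acc sublist => acc ++ sublist) []).map (fun x => x + C)).filter
        (fun x => PySem.Int.mod (x - off) 3 == 0)
      = ((pvFindAllLoop tB seg (tB.toList.length + 2) (PySem.Str.find tB seg)).map (fun h => 3 * h)).map
          (fun p => p + C) := by
  rw [show PySem.List.pyRange 0 3 = [(0:Int),1,2] from by decide]
  rw [htB, pvFindAllLoop_eq,
      show find_all_occurrences_loop (tr 0) seg ((tr 0).toList.length + 2) (PySem.Str.find (tr 0) seg)
        = find_all_occurrences (tr 0) seg from rfl]
  by_cases h0 : PySem.Str.isIn seg (tr 0) <;>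
    by_cases h1 : PySem.Str.isIn seg (tr 1) <;>
      by_cases h2 : PySem.Str.isIn seg (tr 2) <;>
        simp only [List.foldl, h0, h1, h2, Bool.false_eq_true, if_true, if_false,
          List.cons_append, List.nil_append, List.append_nil,
          List.map_append, List.filter_append, pvFrameKeep off C h3,
          pvFrameDrop off C 1 h3 (Or.inl rfl), pvFrameDrop off C 2 h3 (Or.inr rfl),
          List.map_nil, List.filter_nil] <;>
        (rw [Bool.not_eq_true] at h0
         rw [pvFindAll_of_not_isIn _ _ h0]
         simp)

-- A's scan-then-filter equals B's frame-0 scan, for the concrete translations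
theorem pvMain (s seg : String) (ct : List (String × String)) (off C : Int)
    (h3 : (3:Int) ∣ C - off) :
    ((find_translation_position s seg ct).map (fun x => x + C)).filter
        (fun x => PySem.Int.mod (x - off) 3 == 0)
      = (pvFrame0Positions s seg ct).map (fun p => p + C) := by
  unfold find_translation_position pvFrame0Positions
  dsimp only
  exact pvAux
    (fun frame => (PySem.List.pyRange frame (PySem.Str.len s - 2) 3).foldl
      (fun t i => t ++ PySem.Dict.getD (PySem.Dict.mk ct)
          (PySem.Str.slice s (some i) (some (i + 3))) "-") "")
    (PySem.Str.join ""
      ((PySem.List.pyRange 0 (PySem.Str.len s - 2) 3).map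
        (fun i => PySem.Dict.getD (PySem.Dict.mk ct)
            (PySem.Str.slice s (some i) (some (i + 3))) "-")))
    (by exact ((pvFoldl_append_eq_join _ _ "").trans String.empty_append).symm)
    seg off C h3

-- ===== VERDICT (by name: the statement is the Claim_ definition above) =====
theorem find_frameshift_and_segment_starts_spec : Claim_equal_find_frameshift_and_segment_starts := by
  intro seq s1 s2 off ct _
  unfold Spec_find_frameshift_and_segment_starts
  unfold find_frameshift_and_segment_starts find_frameshift_and_segment_starts_alt
  simp only [Prod.mk.injEq]
  refine ⟨?_, ?_⟩
  · rw [show (fun x => x + PySem.Str.len s1 * 3 + (off.1 - 1)) =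
          (fun x : Int => x + (PySem.Str.len s1 * 3 + (off.1 - 1))) from by funext x; ring]
    rw [pvMain _ _ _ (off.1 - 1) (PySem.Str.len s1 * 3 + (off.1 - 1)) (by simp)]
    exact List.map_congr_left (fun p _ => by ring)
  · rw [pvMain _ _ _ (off.2 - 1) (off.2 - 1) (by simp)]
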